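-- pv_equiv track=rewrite | github.com/ThenTech/BDA-Assignments | Plagiarism/Resources/submissions/submissions/2248871.py | cleanup_spaces_vanvoor
-- ===== SOURCE A (Python) =====
-- def cleanup_spaces_vanvoor(s):
--     inword = False
--     string = ""
--
--     for i in s:
--         if "a"<= i <= "z" or "A"<= i <= "Z":
--             inword = True
--             string += i
--         elif i == " " and not inword:
--             inword = False
--         else:
--             string += i
--     return  string
-- ===== SOURCE B (Python) =====
-- def cleanup_spaces_vanvoor(s):
--     idx = len(s)
--     for i, c in enumerate(s):
--         if "a" <= c <= "z" or "A" <= c <= "Z":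
--             idx = i
--             break
--     return s[:idx].replace(" ", "") + s[idx:]
-- ===== Notes on version B (the rewrite author's own statement) =====
-- stated objective: faster
-- what changed: Replaces the flag-driven char-by-char string rebuild with locating the first ASCII letter and one bulk str.replace on the prefix before it, keeping the rest via slicing.
import Mathlib
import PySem

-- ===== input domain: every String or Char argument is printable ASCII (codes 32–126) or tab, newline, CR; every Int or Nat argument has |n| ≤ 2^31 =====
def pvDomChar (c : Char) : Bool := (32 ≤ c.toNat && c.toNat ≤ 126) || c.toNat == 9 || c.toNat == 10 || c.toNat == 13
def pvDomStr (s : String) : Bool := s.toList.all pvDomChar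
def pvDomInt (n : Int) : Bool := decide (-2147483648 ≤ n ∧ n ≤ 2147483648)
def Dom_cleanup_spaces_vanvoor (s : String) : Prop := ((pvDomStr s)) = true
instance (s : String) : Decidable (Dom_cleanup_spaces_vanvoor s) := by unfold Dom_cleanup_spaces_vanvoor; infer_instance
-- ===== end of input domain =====

-- B: finds the first ASCII letter, strips spaces from the prefix before it, keeps the rest unchanged (simpler decomposition).
-- ===== PORT A =====
-- loop over the characters with the 'inword' flag and accumulated string, as in A
def pvALoop : List Char → Bool → List Char → List Char
  | [], _, acc => acc
  | c :: cs, inword, acc =>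
    if ('a' ≤ c && c ≤ 'z') || ('A' ≤ c && c ≤ 'Z') then
      pvALoop cs true (acc ++ [c])
    else if c = ' ' && !inword then
      pvALoop cs false acc
    else
      pvALoop cs inword (acc ++ [c])

def cleanup_spaces_vanvoor (s : String) : String :=
  String.ofList (pvALoop s.toList false [])

-- ===== PORT B =====
-- index of the first ASCII letter (len(s) if none), as B's enumerate loop computes
def pvFirstLetterIdx : List Char → Nat
  | [] => 0
  | c :: cs =>
    if ('a' ≤ c && c ≤ 'z') || ('A' ≤ c && c ≤ 'Z') then 0
    else pvFirstLetterIdx cs + 1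

-- s[:idx].replace(" ", "") removes every space from the prefix: exact as a char filter
def cleanup_spaces_vanvoor_alt (s : String) : String :=
  let cs := s.toList
  let idx := pvFirstLetterIdx cs
  String.ofList ((cs.take idx).filter (fun c => c ≠ ' ') ++ cs.drop idx)

-- ===== PRECONDITION & SPEC =====
def Spec_cleanup_spaces_vanvoor (s : String) (out : String) : Prop := out = cleanup_spaces_vanvoor_alt s
instance (s : String) (out : String) : Decidable (Spec_cleanup_spaces_vanvoor s out) := by unfold Spec_cleanup_spaces_vanvoor; infer_instance

-- ===== CLAIM (what is proved, stated in full; the proofs are below) =====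
def Claim_equal_cleanup_spaces_vanvoor : Prop := ∀ (s : String), Dom_cleanup_spaces_vanvoor s → Spec_cleanup_spaces_vanvoor s (cleanup_spaces_vanvoor s)

-- ===== LEMMAS AND PROOFS =====

-- ===== VERDICT (by name: the statement is the Claim_ definition above) =====
lemma pvALoop_true (cs : List Char) : ∀ acc, pvALoop cs true acc = acc ++ cs := by
  induction cs with
  | nil => intro acc; simp [pvALoop]
  | cons c cs ih =>
    intro acc
    simp only [pvALoop]
    split
    · simp [ih]
    · simp [ih]

lemma pvALoop_false (cs : List Char) : ∀ acc,
    pvALoop cs false acc =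
      acc ++ (cs.take (pvFirstLetterIdx cs)).filter (fun c => c ≠ ' ')
          ++ cs.drop (pvFirstLetterIdx cs) := by
  induction cs with
  | nil => intro acc; simp [pvALoop, pvFirstLetterIdx]
  | cons c cs ih =>
    intro acc
    simp only [pvALoop, pvFirstLetterIdx]
    by_cases h : (('a' ≤ c && c ≤ 'z') || ('A' ≤ c && c ≤ 'Z')) = true
    · simp [h, pvALoop_true]
    · simp only [h, if_false, Bool.false_eq_true]
      by_cases hs : c = ' '
      · simp [hs, ih]
      · simp [hs, ih]

theorem cleanup_spaces_vanvoor_spec : Claim_equal_cleanup_spaces_vanvoor := by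
  intro s _
  unfold Spec_cleanup_spaces_vanvoor cleanup_spaces_vanvoor cleanup_spaces_vanvoor_alt
  simp [pvALoop_false]
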